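-- pv_equiv track=rewrite | github.com/SaharDev/HomeWork | Part2/Question3.py | is_sorted_polyndrom
-- ===== SOURCE A (Python) =====
-- def is_sorted_polyndrom(s: str) -> bool:
--     s = s.lower()
--     l, r = 0, len(s) - 1
--     last = -1
--
--     while l <= r:
--         if s[l] == s[r] and (unicode := ord(s[l])) >= last:
--             l += 1
--             r -= 1
--             last = unicode
--         else:
--             return False
--
--     return True
-- ===== SOURCE B (Python) =====
-- def is_sorted_polyndrom(s: str) -> bool:
--     s = s.lower()
--     if s != s[::-1]:
--         return False
--     half = s[:(len(s) + 1) // 2]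
--     return list(half) == sorted(half)
-- ===== Notes on version B (the rewrite author's own statement) =====
-- stated objective: simpler
-- what changed: Replaces A's fused two-pointer scan that threads a running previous-code accumulator with two plain passes: a reversal-based palindrome test (s == s[::-1]) and a sortedness test on the first half (list(half) == sorted(half)).
import Mathlib
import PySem

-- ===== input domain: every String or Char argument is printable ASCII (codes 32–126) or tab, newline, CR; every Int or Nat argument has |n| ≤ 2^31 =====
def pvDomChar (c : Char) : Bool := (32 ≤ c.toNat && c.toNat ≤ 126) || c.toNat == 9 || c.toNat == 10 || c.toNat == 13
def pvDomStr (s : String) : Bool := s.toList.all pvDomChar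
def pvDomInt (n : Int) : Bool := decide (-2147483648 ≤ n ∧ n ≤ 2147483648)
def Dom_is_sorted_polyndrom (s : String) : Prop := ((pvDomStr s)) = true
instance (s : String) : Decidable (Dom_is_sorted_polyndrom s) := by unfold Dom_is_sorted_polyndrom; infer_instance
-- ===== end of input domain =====

-- B replaces A's fused two-pointer scan with two separate passes (palindrome via reversal,
-- then sortedness of the first half); objective: simpler.

-- ===== PORT A =====
-- the while loop of A: two pointers l, r threading the previously seen code point
def pvALoop (cs : List Char) (l r last : Int) : Bool :=
  if _h : l ≤ r then
    match PySem.List.pyGet? cs l, PySem.List.pyGet? cs r with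
    | some cl, some cr =>
        if cl = cr ∧ last ≤ (cl.toNat : Int) then pvALoop cs (l + 1) (r - 1) (cl.toNat : Int)
        else false
    | _, _ => false   -- IndexError guard; unreachable for the initial l, r of A
  else true
termination_by (r + 1 - l).toNat
decreasing_by omega

def is_sorted_polyndrom (s : String) : Bool :=
  let cs := PySem.Chars.lower s.toList
  pvALoop cs 0 ((cs.length : Int) - 1) (-1)

-- ===== PORT B =====
def is_sorted_polyndrom_alt (s : String) : Bool :=
  let cs := PySem.Chars.lower s.toList
  if cs ≠ (PySem.List.slice? cs none none (-1)).getD [] then false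
  else
    let half := PySem.List.slice cs none (some (PySem.Int.floordiv ((cs.length : Int) + 1) 2))
    decide (half = PySem.List.sorted half (fun c => c) false)

-- ===== PRECONDITION & SPEC =====
def Spec_is_sorted_polyndrom (s : String) (out : Bool) : Prop := out = is_sorted_polyndrom_alt s
instance (s : String) (out : Bool) : Decidable (Spec_is_sorted_polyndrom s out) := by unfold Spec_is_sorted_polyndrom; infer_instance

-- ===== CLAIM (what is proved, stated in full; the proofs are below) =====
def Claim_equal_is_sorted_polyndrom : Prop := ∀ (s : String), Dom_is_sorted_polyndrom s → Spec_is_sorted_polyndrom s (is_sorted_polyndrom s)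

-- ===== LEMMAS AND PROOFS =====

-- structural middleman: peel one char from each end, carrying the last code point
def pvG : List Char → Int → Bool
  | [], _ => true
  | c :: rest, last =>
      (decide (c = (c :: rest).getLast (by simp)) && decide (last ≤ (c.toNat : Int)))
        && pvG rest.dropLast (c.toNat : Int)
termination_by cs => cs.length
decreasing_by simp

-- the first half of the string, indices 0 .. (n-1)/2
def pvHalf (cs : List Char) : List Char := cs.take ((cs.length + 1) / 2)

theorem pvCharLe (u v : Char) : ((u.toNat : Int) ≤ (v.toNat : Int)) ↔ u ≤ v := by
  rw [Nat.cast_le, Char.le_def, UInt32.le_iff_toNat_le]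
  rfl

theorem pvHalf_cons_concat (c d : Char) (mid : List Char) :
    pvHalf (c :: (mid ++ [d])) = c :: pvHalf mid := by
  unfold pvHalf
  have h1 : ((c :: (mid ++ [d])).length + 1) / 2 = (mid.length + 1) / 2 + 1 := by
    simp; omega
  rw [h1, List.take_succ_cons, List.take_append_of_le_length (by omega)]

theorem pvRev_cons_concat (c d : Char) (mid : List Char) :
    ((c :: (mid ++ [d])).reverse = c :: (mid ++ [d])) ↔ (c = d ∧ mid.reverse = mid) := by
  simp [List.reverse_cons]
  constructor
  · rintro ⟨h1, h2, h3⟩; exact ⟨h1.symm, h2⟩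
  · rintro ⟨h1, h2⟩; exact ⟨h1.symm, h2, h1⟩

theorem pvG_spec (cs : List Char) (last : Int) :
    pvG cs last = true ↔
      (cs.reverse = cs ∧ (pvHalf cs).IsChain (· ≤ ·) ∧
        ∀ y ∈ (pvHalf cs).head?, last ≤ (y.toNat : Int)) := by
  induction cs using List.bidirectionalRec generalizing last with
  | nil => simp [pvG, pvHalf]
  | singleton a => simp [pvG, pvHalf]
  | cons_append a l b ih =>
      rw [pvG]
      have hgl : (a :: (l ++ [b])).getLast (by simp) = b := by simp
      simp only [hgl, List.dropLast_concat, Bool.and_eq_true, decide_eq_true_eq, ih,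
        pvRev_cons_concat, pvHalf_cons_concat, List.isChain_cons', List.head?_cons,
        Option.mem_some_iff, forall_eq']
      constructor
      · rintro ⟨⟨hab, hlast⟩, hrev, hch, hhd⟩
        exact ⟨⟨hab, hrev⟩, ⟨fun y hy => (pvCharLe a y).mp (hhd y hy), hch⟩, hlast⟩
      · rintro ⟨⟨hab, hrev⟩, ⟨hhd, hch⟩, hlast⟩
        exact ⟨⟨hab, hlast⟩, hrev, hch, fun y hy => (pvCharLe a y).mpr (hhd y hy)⟩

theorem pvALoop_eq_pvG_aux (cs : List Char) (k : Nat) :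
    ∀ (l r last : Int), (r + 1 - l).toNat ≤ k → 0 ≤ l → -1 ≤ r → r < (cs.length : Int) →
      pvALoop cs l r last = pvG (PySem.List.slice cs (some l) (some (r + 1))) last := by
  induction k with
  | zero =>
      intro l r last hk hl hr1 hr2
      have hlr : ¬ l ≤ r := by omega
      rw [pvALoop]
      simp only [hlr, dif_neg, not_false_iff]
      have hnil : PySem.List.slice cs (some l) (some (r + 1)) = [] := by
        rw [PySem.List.slice_toNat cs hl (by omega)]
        have h0 : (r + 1).toNat - l.toNat = 0 := by omega
        simp [h0]
      rw [hnil, pvG]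
  | succ k ih =>
      intro l r last hk hl hr1 hr2
      by_cases hlr : l ≤ r
      · have hln : l.toNat < cs.length := by omega
        have hrn : r.toNat < cs.length := by omega
        have hgl : PySem.List.pyGet? cs l = some cs[l.toNat] :=
          PySem.List.pyGet?_eq_some_getElem cs hl (by omega)
        have hgr : PySem.List.pyGet? cs r = some cs[r.toNat] :=
          PySem.List.pyGet?_eq_some_getElem cs (by omega) (by omega)
        rw [pvALoop]
        simp only [hlr, dif_pos, hgl, hgr]
        have hseg : PySem.List.slice cs (some l) (some (r + 1)) =
            cs[l.toNat] :: PySem.List.slice cs (some (l + 1)) (some (r + 1)) := by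
          rw [PySem.List.slice_toNat cs hl (by omega), PySem.List.slice_toNat cs (by omega) (by omega)]
          rw [List.drop_eq_getElem_cons hln]
          have h2 : (r + 1).toNat - l.toNat = ((r + 1).toNat - (l + 1).toNat) + 1 := by omega
          rw [h2, List.take_succ_cons, show (l + 1).toNat = l.toNat + 1 by omega]
        rw [hseg]
        have hrec := ih (l + 1) (r - 1) (cs[l.toNat].toNat : Int) (by omega) (by omega)
          (by omega) (by omega)
        have hr1' : r - 1 + 1 = r := by omega
        rw [hr1'] at hrec
        by_cases he : l = r
        · subst he
          have hrest : PySem.List.slice cs (some (l + 1)) (some (l + 1)) = [] := by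
            rw [PySem.List.slice_toNat cs (by omega) (by omega)]
            simp
          rw [hrest, pvG]
          have hloop : pvALoop cs (l + 1) (l - 1) (cs[l.toNat].toNat : Int) = true := by
            rw [pvALoop, dif_neg (by omega : ¬ (l + 1 ≤ l - 1))]
          by_cases hc : cs[l.toNat] = cs[l.toNat] ∧ last ≤ (cs[l.toNat].toNat : Int)
          · rw [if_pos hc, hloop]
            simp [pvG, hc.2]
          · rw [if_neg hc]
            have hnot : ¬ last ≤ (cs[l.toNat].toNat : Int) := by tauto
            simp [pvG, hnot]
        · -- l < r : the tail slice ends with cs[r]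
          have hlt : l < r := by omega
          have hsnoc : PySem.List.slice cs (some (l + 1)) (some (r + 1)) =
              PySem.List.slice cs (some (l + 1)) (some r) ++ [cs[r.toNat]] := by
            rw [PySem.List.slice_toNat cs (by omega) (by omega),
                PySem.List.slice_toNat cs (by omega) (by omega)]
            have hm : (r + 1).toNat - (l + 1).toNat = (r.toNat - (l + 1).toNat) + 1 := by omega
            rw [hm, List.take_succ]
            congr 1
            have hidx : (l + 1).toNat + (r.toNat - (l + 1).toNat) < cs.length := by omega
            rw [List.getElem?_drop, List.getElem?_eq_getElem (by omega)]
            simp only [Option.toList_some]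
            congr 2
            omega
          rw [hsnoc, pvG]
          have hgl2 : (cs[l.toNat] :: (PySem.List.slice cs (some (l + 1)) (some r) ++ [cs[r.toNat]])).getLast (by simp) = cs[r.toNat] := by
            simp
          simp only [hgl2, List.dropLast_concat]
          by_cases hc : cs[l.toNat] = cs[r.toNat] ∧ last ≤ (cs[l.toNat].toNat : Int)
          · rw [if_pos hc, hrec, decide_eq_true hc.1, decide_eq_true hc.2,
                Bool.true_and, Bool.true_and]
          · rw [if_neg hc]
            rcases Decidable.not_and_iff_not_or_not.mp hc with h | h <;> simp [h]
      · have hk0 : (r + 1 - l).toNat ≤ 0 := by omega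
        exact ih l r last (by omega) hl hr1 hr2

theorem pvChain_iff_sorted (half : List Char) :
    (half = PySem.List.sorted half (fun c => c) false) ↔ half.IsChain (· ≤ ·) := by
  rw [List.isChain_iff_pairwise]
  constructor
  · intro h
    have := PySem.List.sorted_pairwise half (fun c => c)
    rw [← h] at this
    exact this
  · intro h
    exact (PySem.List.sorted_eq_self_of_pairwise half (fun c => c) h).symm

-- ===== VERDICT (by name: the statement is the Claim_ definition above) =====
theorem is_sorted_polyndrom_spec : Claim_equal_is_sorted_polyndrom := by
  intro s _
  unfold Spec_is_sorted_polyndrom is_sorted_polyndrom is_sorted_polyndrom_alt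
  set cs := PySem.Chars.lower s.toList with hcs
  simp only [PySem.List.slice?_none_none_neg_one, Option.getD_some]
  have hA : pvALoop cs 0 ((cs.length : Int) - 1) (-1) = pvG cs (-1) := by
    rw [pvALoop_eq_pvG_aux cs (cs.length) 0 ((cs.length : Int) - 1) (-1) (by omega) (by omega)
      (by omega) (by omega)]
    have h1 : (cs.length : Int) - 1 + 1 = (cs.length : Int) := by ring
    rw [h1]
    congr 1
    rw [PySem.List.slice_toNat cs (by omega) (by omega)]
    simp
  rw [hA]
  have hfd : 0 ≤ PySem.Int.floordiv ((cs.length : Int) + 1) 2 := by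
    unfold PySem.Int.floordiv
    rw [Int.fdiv_eq_ediv]
    simp
    omega
  have hhalf : PySem.List.slice cs none (some (PySem.Int.floordiv ((cs.length : Int) + 1) 2))
      = pvHalf cs := by
    rw [PySem.List.slice_to cs hfd]
    have h2 : (PySem.Int.floordiv ((cs.length : Int) + 1) 2).toNat = (cs.length + 1) / 2 := by
      unfold PySem.Int.floordiv
      rw [Int.fdiv_eq_ediv]
      simp
      omega
    rw [h2]
    rfl
  rw [hhalf]
  by_cases hrev : cs.reverse = cs
  · have hne : ¬ (cs ≠ cs.reverse) := by simp [hrev]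
    rw [if_neg hne, Bool.eq_iff_iff, pvG_spec, decide_eq_true_eq, pvChain_iff_sorted]
    constructor
    · rintro ⟨_, hch, _⟩; exact hch
    · intro hch
      exact ⟨hrev, hch, fun y _ => le_trans (by norm_num) (Int.natCast_nonneg _)⟩
  · have hne : (cs ≠ cs.reverse) := fun h => hrev h.symm
    rw [if_pos hne]
    cases h : pvG cs (-1) with
    | false => rfl
    | true => exact absurd ((pvG_spec cs (-1)).mp h).1 hrev
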